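-- pv_equiv track=rewrite | github.com/joohyun333/programmers | LV2/programmers_joystick.py | solution
-- ===== SOURCE A (Python) =====
-- def solution(name):
--     alpha = ["A","B","C","D","E","F","G","H","I","J","K","L","M","N","O","P","Q","R","S","T","U","V","W","X","Y","Z"]
--     answer = []
--     alpha_n = len(alpha)
--     for i in enumerate(alpha):
--         for j in name:
--             if i[1] == j:
--                 if i[0] > (alpha_n // 2)-1:
--                     answer.append((alpha_n+1) - i[0]-1)
--                 else:
--                     answer.append(i[0])
--     result = sum(answer) + len(name) -1
--     if "A" in name :
--         result -= 1
--     return result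
-- ===== SOURCE B (Python) =====
-- def solution(name):
--     cnt = {}
--     for c in name:
--         cnt[c] = cnt.get(c, 0) + 1
--     total = sum(min(k, 26 - k) * cnt.get(chr(65 + k), 0) for k in range(26))
--     return total - (1 if cnt.get('A', 0) else 0) + len(name) - 1
-- ===== Notes on version B (the rewrite author's own statement) =====
-- stated objective: faster
-- what changed: Replaces A's 26-by-len(name) nested scan (per-letter scan of name collecting costs in a list, then summed) with a histogram dict built in one pass over name followed by a fixed 26-term sum of cost times count, so the inner scan of name disappears.
import Mathlib
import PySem

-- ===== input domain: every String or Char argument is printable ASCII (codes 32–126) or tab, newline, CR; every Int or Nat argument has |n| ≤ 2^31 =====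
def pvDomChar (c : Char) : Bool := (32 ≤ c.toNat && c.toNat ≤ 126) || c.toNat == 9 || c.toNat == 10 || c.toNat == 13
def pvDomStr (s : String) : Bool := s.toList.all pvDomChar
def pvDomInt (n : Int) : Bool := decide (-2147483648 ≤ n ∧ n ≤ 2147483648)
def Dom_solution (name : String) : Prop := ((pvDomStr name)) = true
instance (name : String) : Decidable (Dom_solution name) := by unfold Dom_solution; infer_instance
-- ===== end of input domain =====

-- B builds a character-count dict in one pass and sums cost*count over the 26 letters, removing A's per-letter scans of name (measurably faster in a timing run).


-- ===== PORT A =====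
-- the Python list of one-character strings, as a list of characters
def solAlpha : List Char :=
  ['A','B','C','D','E','F','G','H','I','J','K','L','M','N','O','P','Q','R','S','T','U','V','W','X','Y','Z']

def solution (name : String) : Int :=
  let alphaN : Int := (solAlpha.length : Int)
  let answer : List Int :=
    (PySem.List.enumerate solAlpha).foldl (fun acc i =>
      name.toList.foldl (fun acc j =>
        if i.2 = j then
          if i.1 > (PySem.Int.floordiv alphaN 2) - 1 then
            acc ++ [(alphaN + 1) - i.1 - 1]
          else
            acc ++ [i.1]
        else acc) acc) []
  let result := answer.sum + (name.toList.length : Int) - 1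
  if name.toList.contains 'A' then result - 1 else result

-- ===== PORT B =====
-- chr(65 + k)
def solLetterOf (k : Int) : Char := Char.ofNat (65 + k).toNat

def solution_alt (name : String) : Int :=
  let cnt : PySem.Dict Char Int :=
    name.toList.foldl (fun d c => d.insert c (d.getD c 0 + 1)) PySem.Dict.empty
  let total : Int :=
    ((PySem.List.pyRange 0 26 1).map (fun k => min k (26 - k) * cnt.getD (solLetterOf k) 0)).sum
  total - (if cnt.getD 'A' 0 ≠ 0 then 1 else 0) + (name.toList.length : Int) - 1

-- ===== PRECONDITION & SPEC =====
def Spec_solution (name : String) (out : Int) : Prop := out = solution_alt name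
instance (name : String) (out : Int) : Decidable (Spec_solution name out) := by unfold Spec_solution; infer_instance

-- ===== CLAIM (what is proved, stated in full; the proofs are below) =====
def Claim_equal_solution : Prop := ∀ (name : String), Dom_solution name → Spec_solution name (solution name)

-- ===== LEMMAS AND PROOFS =====

-- A's cost for the letter with enumerate index k
def solCost (k : Int) : Int := if k > 12 then 27 - k - 1 else k

-- the common per-character vertical cost
def solCostB (c : Char) : Int :=
  if 'A' ≤ c ∧ c ≤ 'Z' then min ((c.toNat : Int) - 65) (26 - ((c.toNat : Int) - 65)) else 0

-- per character: the 26 letter tests of A's outer loop sum to the per-character cost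
theorem solCost_char (c : Char) :
    ((PySem.List.enumerate solAlpha).map (fun i => if i.2 = c then solCost i.1 else 0)).sum
      = solCostB c := by
  by_cases h : 'A' ≤ c ∧ c ≤ 'Z'
  · have h1 : 65 ≤ c.toNat := h.1
    have h2 : c.toNat ≤ 90 := h.2
    obtain ⟨n, hn⟩ : ∃ n, c.toNat = n := ⟨_, rfl⟩
    have hc : c = Char.ofNat n := by rw [← hn, Char.ofNat_toNat]
    rw [hn] at h1 h2
    subst hc
    interval_cases n <;> decide
  · have hz : solCostB c = 0 := by simp [solCostB, h]
    rw [hz]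
    have key : ∀ a ∈ solAlpha, ¬ (a = c) := by
      intro a ha e; subst e
      exact h (by fin_cases ha <;> exact ⟨by decide, by decide⟩)
    have hmap : ∀ i ∈ PySem.List.enumerate solAlpha, (if i.2 = c then solCost i.1 else 0) = 0 := by
      intro i hi
      rw [PySem.List.mem_enumerate_iff] at hi
      obtain ⟨k, hk, rfl⟩ := hi
      simp [key _ (List.getElem_mem hk)]
    rw [List.map_congr_left hmap]
    simp

theorem sum_flatMap_char {α : Type} (l : List α) (f : α → List Int) :
    (l.flatMap f).sum = (l.map (fun x => (f x).sum)).sum := by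
  induction l with
  | nil => simp
  | cons a l ih => simp [ih]

-- interchanging A's two loops: per-letter match sums equal the per-character sum
theorem solution_sum_eq (l : List Char) :
    ((PySem.List.enumerate solAlpha).map
        (fun i => ((l.filter (fun j => i.2 = j)).map (fun _ => solCost i.1)).sum)).sum
      = (l.map solCostB).sum := by
  induction l with
  | nil => simp
  | cons c l ih =>
    have hsplit : ∀ i : Int × Char,
        (((c :: l).filter (fun j => i.2 = j)).map (fun _ => solCost i.1)).sum
          = (if i.2 = c then solCost i.1 else 0)
            + ((l.filter (fun j => i.2 = j)).map (fun _ => solCost i.1)).sum := by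
      intro i
      by_cases h : i.2 = c <;> simp [h]
    simp only [hsplit, List.sum_map_add, solCost_char, ih, List.map_cons, List.sum_cons]

-- A's answer-list sum, as a closed form
theorem answer_sum_eq (l : List Char) :
    ((PySem.List.enumerate solAlpha).foldl (fun acc i =>
        l.foldl (fun acc j =>
          if i.2 = j then
            if i.1 > (PySem.Int.floordiv ((solAlpha.length : Int)) 2) - 1 then
              acc ++ [((solAlpha.length : Int) + 1) - i.1 - 1]
            else
              acc ++ [i.1]
          else acc) acc) ([] : List Int)).sum
      = (l.map solCostB).sum := by
  have inner : ∀ (i : Int × Char) (acc : List Int),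
      l.foldl (fun acc j =>
          if i.2 = j then
            if i.1 > (PySem.Int.floordiv ((solAlpha.length : Int)) 2) - 1 then
              acc ++ [((solAlpha.length : Int) + 1) - i.1 - 1]
            else
              acc ++ [i.1]
          else acc) acc
        = acc ++ (l.filter (fun j => i.2 = j)).map (fun _ => solCost i.1) := by
    intro i acc
    have hstep : l.foldl (fun acc j =>
          if i.2 = j then
            if i.1 > (PySem.Int.floordiv ((solAlpha.length : Int)) 2) - 1 then
              acc ++ [((solAlpha.length : Int) + 1) - i.1 - 1]
            else
              acc ++ [i.1]
          else acc) acc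
        = l.foldl (fun acc j => if i.2 = j then acc ++ [solCost i.1] else acc) acc := by
      apply PySem.List.foldl_congr_mem
      intro acc j _
      by_cases h : i.2 = j
      · have e1 : (solAlpha.length : Int) = 26 := by decide
        have e2 : PySem.Int.floordiv (26 : Int) 2 = 13 := by decide
        rw [if_pos h, if_pos h, e1, e2, ← apply_ite (fun x => acc ++ [x])]
        have hv : (if i.1 > (13 : Int) - 1 then (26 : Int) + 1 - i.1 - 1 else i.1)
            = solCost i.1 := by
          unfold solCost; split_ifs <;> omega
        rw [hv]
      · simp [h]
    rw [hstep, PySem.List.foldl_append_ite]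
  have houter : (PySem.List.enumerate solAlpha).foldl (fun acc i =>
        l.foldl (fun acc j =>
          if i.2 = j then
            if i.1 > (PySem.Int.floordiv ((solAlpha.length : Int)) 2) - 1 then
              acc ++ [((solAlpha.length : Int) + 1) - i.1 - 1]
            else
              acc ++ [i.1]
          else acc) acc) ([] : List Int)
      = (PySem.List.enumerate solAlpha).foldl (fun acc i =>
          acc ++ (l.filter (fun j => i.2 = j)).map (fun _ => solCost i.1)) ([] : List Int) := by
    apply PySem.List.foldl_congr_mem
    intro acc i _
    exact inner i acc
  rw [houter, PySem.List.foldl_append_eq_flatMap, List.nil_append, sum_flatMap_char,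
    solution_sum_eq]

-- the 26-term indicator sum of B picks out exactly one character's cost
theorem indicator_sum_eq (c : Char) :
    ((PySem.List.pyRange 0 26 1).map
        (fun k => min k (26 - k) * (if solLetterOf k = c then (1 : Int) else 0))).sum
      = solCostB c := by
  by_cases h : 'A' ≤ c ∧ c ≤ 'Z'
  · have h1 : 65 ≤ c.toNat := h.1
    have h2 : c.toNat ≤ 90 := h.2
    obtain ⟨n, hn⟩ : ∃ n, c.toNat = n := ⟨_, rfl⟩
    have hc : c = Char.ofNat n := by rw [← hn, Char.ofNat_toNat]
    rw [hn] at h1 h2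
    subst hc
    interval_cases n <;> decide
  · have hmap : ∀ k ∈ PySem.List.pyRange 0 26 1,
        min k (26 - k) * (if solLetterOf k = c then (1 : Int) else 0) = 0 := by
      intro k hk
      rw [PySem.List.mem_pyRange_one] at hk
      have hne : solLetterOf k ≠ c := by
        intro e
        apply h
        rw [← e]
        obtain ⟨h0, h26⟩ := hk
        interval_cases k <;> exact ⟨by decide, by decide⟩
      simp [hne]
    rw [List.map_congr_left hmap]
    have hz : solCostB c = 0 := by simp [solCostB, h]
    simp [hz]

-- B's 26-term count sum, as the same per-character closed form
theorem total_count_eq (l : List Char) :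
    ((PySem.List.pyRange 0 26 1).map
        (fun k => min k (26 - k) * ((l.count (solLetterOf k) : Int)))).sum
      = (l.map solCostB).sum := by
  induction l with
  | nil => simp
  | cons c l ih =>
    have hsplit : ∀ k : Int,
        min k (26 - k) * (((c :: l).count (solLetterOf k) : Int))
          = min k (26 - k) * ((l.count (solLetterOf k) : Int))
            + min k (26 - k) * (if solLetterOf k = c then (1 : Int) else 0) := by
      intro k
      rw [List.count_cons]
      by_cases h : solLetterOf k = c
      · simp [h]; ring
      · rw [if_neg (fun e => h (eq_of_beq e).symm), if_neg h, Nat.add_zero]; ring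
    simp only [hsplit, List.sum_map_add, ih, indicator_sum_eq, List.map_cons, List.sum_cons]
    ring

-- ===== VERDICT (by name: the statement is the Claim_ definition above) =====
theorem solution_spec : Claim_equal_solution := by
  intro name _
  unfold Spec_solution solution solution_alt
  simp only [PySem.Dict.foldl_insert_getD_add_one_eq_counter, PySem.Dict.getD_counter]
  rw [answer_sum_eq, total_count_eq]
  have hA : (¬ ((name.toList.count 'A' : Int) = 0)) ↔ name.toList.contains 'A' = true := by
    simp [List.count_eq_zero]
  by_cases h : name.toList.contains 'A' = true
  · rw [if_pos h, if_pos (hA.mpr h)]; ring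
  · rw [if_neg h, if_neg (fun hc => h (hA.mp hc))]; ring
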